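-- pv_equiv track=rewrite | github.com/oadamilola/PyLibrary | bookSelect.py | finalfreq
-- ===== SOURCE A (Python) =====
-- def finalfreq(onegenre,genres,freq):
--     '''
--     function that adds up the sum of how many times eac instance of every genre has been borrowed and creates
--     '''
--     nfreq=[]
--     for i in range(0,len(onegenre)):
--         count=0
--         for c in range(0,len(genres)):
--             if onegenre[i]==genres[c]:
--                 count= count+freq[c]
--             else:
--                 ()
--         nfreq.append(count)
--     return nfreq
-- ===== SOURCE B (Python) =====
-- def finalfreq(onegenre, genres, freq):
--     totals = {}
--     for g, f in zip(genres, freq):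
--         totals[g] = totals.get(g, 0) + f
--     return [totals.get(q, 0) for q in onegenre]
-- ===== Notes on version B (the rewrite author's own statement) =====
-- stated objective: faster
-- what changed: Replaces the nested rescan of genres for every query by one aggregation pass building a genre->summed-frequency dict followed by one lookup pass over the queries.
import Mathlib
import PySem

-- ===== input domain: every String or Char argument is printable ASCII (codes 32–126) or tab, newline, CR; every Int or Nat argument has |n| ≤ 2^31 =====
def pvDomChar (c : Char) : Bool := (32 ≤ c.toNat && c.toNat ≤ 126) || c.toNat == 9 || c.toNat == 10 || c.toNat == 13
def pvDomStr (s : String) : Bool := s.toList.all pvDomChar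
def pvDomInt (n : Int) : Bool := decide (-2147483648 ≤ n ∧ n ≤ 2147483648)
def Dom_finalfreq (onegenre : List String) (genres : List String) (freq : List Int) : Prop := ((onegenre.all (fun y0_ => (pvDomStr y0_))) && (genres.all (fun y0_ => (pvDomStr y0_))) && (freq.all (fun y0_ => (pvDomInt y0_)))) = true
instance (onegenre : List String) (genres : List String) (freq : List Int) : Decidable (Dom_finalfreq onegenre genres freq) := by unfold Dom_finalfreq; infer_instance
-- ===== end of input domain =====

-- B replaces A's per-query rescan of genres by one dict-building aggregation pass plus one lookup pass (faster).


-- ===== PORT A =====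
-- Literal port of A: outer loop over range(len(onegenre)) appending, inner loop over range(len(genres))
-- accumulating count.  freq[c] is read only when onegenre[i]==genres[c]; inside Pre_ that index is in range,
-- so pyGetD with default 0 is exact there (outside Pre_ the Python raises IndexError).
def finalfreq (onegenre : List String) (genres : List String) (freq : List Int) : List Int :=
  (PySem.List.pyRange 0 (onegenre.length : Int) 1).foldl
    (fun nfreq i =>
      nfreq ++ [ (PySem.List.pyRange 0 (genres.length : Int) 1).foldl
          (fun count c =>
            if PySem.List.pyGetD onegenre i "" == PySem.List.pyGetD genres c "" then
              count + PySem.List.pyGetD freq c 0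
            else count)
          0 ])
    []

-- ===== PORT B =====
def finalfreq_alt (onegenre : List String) (genres : List String) (freq : List Int) : List Int :=
  let totals := (genres.zip freq).foldl
    (fun d p => d.insert p.1 (d.getD p.1 0 + p.2)) PySem.Dict.empty
  onegenre.map (fun q => totals.getD q 0)

-- ===== PRECONDITION & SPEC =====
-- Pre_ excludes exactly the inputs where A raises IndexError: a genre at an index >= len(freq) matching some query.
def Pre_finalfreq (onegenre : List String) (genres : List String) (freq : List Int) : Prop :=
  ∀ g ∈ genres.drop freq.length, g ∉ onegenre
instance (onegenre : List String) (genres : List String) (freq : List Int) : Decidable (Pre_finalfreq onegenre genres freq) := by unfold Pre_finalfreq; infer_instance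
def pvWitness_finalfreq : List String × List String × List Int := (["a", "b"], ["a", "b", "a"], [1, 2, 3])

def Spec_finalfreq (onegenre : List String) (genres : List String) (freq : List Int) (out : List Int) : Prop := out = finalfreq_alt onegenre genres freq
instance (onegenre : List String) (genres : List String) (freq : List Int) (out : List Int) : Decidable (Spec_finalfreq onegenre genres freq out) := by unfold Spec_finalfreq; infer_instance

-- ===== CLAIM (what is proved, stated in full; the proofs are below) =====
def Claim_equal_finalfreq : Prop := ∀ (onegenre : List String) (genres : List String) (freq : List Int), Dom_finalfreq onegenre genres freq → Pre_finalfreq onegenre genres freq → Spec_finalfreq onegenre genres freq (finalfreq onegenre genres freq)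

-- ===== LEMMAS AND PROOFS =====

-- B's dict lookup is the sum of the frequencies paired with q in the aggregation list.
lemma dict_lookup (l : List (String × Int)) (d : PySem.Dict String Int) (q : String) :
    (l.foldl (fun d p => d.insert p.1 (d.getD p.1 0 + p.2)) d).getD q 0
      = d.getD q 0 + ((l.filter (fun p => q == p.1)).map (·.2)).sum := by
  induction l generalizing d with
  | nil => simp
  | cons p l ih =>
      simp only [List.foldl_cons, ih, List.filter_cons]
      rw [PySem.Dict.getD_insert]
      by_cases h : q = p.1
      · simp [h]; ring
      · simp [h]

-- index-shift for pyGetD on a cons cell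
lemma pyGetD_cons_succ {α : Type} (x : α) (xs : List α) (k : Nat) (d : α) :
    PySem.List.pyGetD (x :: xs) ((k : Int) + 1) d = PySem.List.pyGetD xs (k : Int) d := by
  have h1 : ((k : Int) + 1) = ((k + 1 : Nat) : Int) := by push_cast; ring
  rw [h1, PySem.List.pyGetD_natCast, PySem.List.pyGetD_natCast]
  simp [List.getD]

-- pyGetD at index k+1 in a list equals pyGetD at k in its tail (for [] both give the default).
lemma pyGetD_shift (fs : List Int) (k : Nat) :
    PySem.List.pyGetD fs ((k : Int) + 1) 0 = PySem.List.pyGetD fs.tail (k : Int) 0 := by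
  cases fs with
  | nil => simp [PySem.List.pyGetD, PySem.List.pyGet?, PySem.List.pyIdx?]
  | cons f fs => exact pyGetD_cons_succ f fs k 0

-- A's inner counting loop equals the filtered-zip sum B's dict aggregates
-- (an index beyond fs contributes pyGetD's default 0; the Python raises there, which Pre_ excludes).
lemma inner_eq (q : String) :
    ∀ (gs : List String) (fs : List Int) (a : Int),
    (PySem.List.pyRange 0 (gs.length : Int) 1).foldl
        (fun count c => if q == PySem.List.pyGetD gs c "" then count + PySem.List.pyGetD fs c 0 else count) a
      = a + (((gs.zip fs).filter (fun p => q == p.1)).map (·.2)).sum := by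
  intro gs
  induction gs with
  | nil => intro fs a; simp [PySem.List.pyRange_one_eq_nil]
  | cons g gs ih =>
      intro fs a
      have hcons : PySem.List.pyRange 0 (((g :: gs).length : Nat) : Int) 1
          = 0 :: PySem.List.pyRange 1 (((g :: gs).length : Nat) : Int) 1 := by
        apply PySem.List.pyRange_one_cons; simp
      have hshift : PySem.List.pyRange 1 (((g :: gs).length : Nat) : Int) 1
          = (PySem.List.pyRange 0 ((gs.length : Nat) : Int) 1).map (fun c => c + 1) := by
        simp only [PySem.List.pyRange_one, List.length_cons]
        have : (((gs.length : Nat) : Int) + 1 - 1).toNat = ((gs.length : Nat) : Int).toNat := by omega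
        push_cast
        simp only [this, Int.toNat_natCast, List.map_map]
        apply List.map_congr_left; intro k hk; simp; ring
      rw [hcons]
      simp only [List.foldl_cons, hshift, List.foldl_map]
      have hstep : ∀ (k : Nat) (cnt : Int),
          (if q == PySem.List.pyGetD (g :: gs) ((k : Int) + 1) "" then cnt + PySem.List.pyGetD fs ((k : Int) + 1) 0 else cnt)
          = (if q == PySem.List.pyGetD gs (k : Int) "" then cnt + PySem.List.pyGetD fs.tail (k : Int) 0 else cnt) := by
        intro k cnt
        rw [pyGetD_cons_succ g gs k "", pyGetD_shift fs k]
      have hfold : ∀ (init : Int),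
          (PySem.List.pyRange 0 ((gs.length : Nat) : Int) 1).foldl
            (fun count c => if q == PySem.List.pyGetD (g :: gs) (c + 1) "" then count + PySem.List.pyGetD fs (c + 1) 0 else count) init
          = (PySem.List.pyRange 0 ((gs.length : Nat) : Int) 1).foldl
            (fun count c => if q == PySem.List.pyGetD gs c "" then count + PySem.List.pyGetD fs.tail c 0 else count) init := by
        intro init
        apply PySem.List.foldl_congr_mem
        intro cnt c hc
        have ⟨h0, _⟩ := (PySem.List.mem_pyRange_one).mp hc
        obtain ⟨k, rfl⟩ : ∃ k : Nat, c = (k : Int) := ⟨c.toNat, by omega⟩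
        exact hstep k cnt
      have hg0 : PySem.List.pyGetD (g :: gs) (0 : Int) "" = g := by
        simp [PySem.List.pyGetD, PySem.List.pyGet?, PySem.List.pyIdx?]
      rw [hfold, ih fs.tail]
      cases fs with
      | nil => simp [PySem.List.pyGetD, PySem.List.pyGet?, PySem.List.pyIdx?]
      | cons f fs =>
          simp only [List.zip_cons_cons, List.filter_cons, List.tail_cons, hg0]
          by_cases h : q = g
          · have hf : PySem.List.pyGetD (f :: fs) (0 : Int) 0 = f := by
              simp [PySem.List.pyGetD, PySem.List.pyGet?, PySem.List.pyIdx?]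
            simp [h, hf]; ring
          · simp [h]

-- ===== VERDICT (by name: the statement is the Claim_ definition above) =====
theorem finalfreq_spec : Claim_equal_finalfreq := by
  intro onegenre genres freq _ _
  unfold Spec_finalfreq finalfreq finalfreq_alt
  simp only [PySem.List.foldl_append_singleton_eq_map, List.nil_append, inner_eq,
    dict_lookup, PySem.Dict.getD_empty]
  rw [show (fun (i : Int) => 0 + (List.map (fun x => x.2) (List.filter (fun p => PySem.List.pyGetD onegenre i "" == p.1) (genres.zip freq))).sum)
        = (fun q => 0 + (List.map (fun x => x.2) (List.filter (fun p => q == p.1) (genres.zip freq))).sum)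
          ∘ (fun i => PySem.List.pyGetD onegenre i "") from rfl,
      ← List.map_map, PySem.List.map_pyGetD_pyRange_zero']
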